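-- pv_equiv track=rewrite | github.com/sanjaybommalene/practiceproblems | SetTheory.py | group_elements_dsu
-- ===== SOURCE A (Python) =====
-- def group_elements_dsu(elements):
--     dsu = DSU()
--     property_to_element = {}
--
--     # Union elements that share any property
--     for element, props in elements.items():
--         for prop in props:
--             if prop in property_to_element:
--                 dsu.union(element, property_to_element[prop])
--             else:
--                 property_to_element[prop] = element
--
--     # Group elements by their root representative
--     groups = {}
--     for element in elements:
--         root = dsu.find(element)
--         groups.setdefault(root, []).append(element)
--
--     return list(groups.values())
--
-- class DSU:
--     def __init__(self):
--         self.parent = {}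
--
--     def find(self, x):
--         if x not in self.parent:
--             self.parent[x] = x
--         if self.parent[x] != x:
--             self.parent[x] = self.find(self.parent[x])
--         return self.parent[x]
--
--     def union(self, x, y):
--         self.parent[self.find(x)] = self.find(y)
-- ===== SOURCE B (Python) =====
-- # Quick-find: flat element->representative map with eager relabelling, instead of a parent forest.
-- def group_elements_dsu(elements):
--     root = {e: e for e in elements}
--     prop_owner = {}
--     for element, props in elements.items():
--         for prop in props:
--             owner = prop_owner.setdefault(prop, element)
--             rx, ry = root[element], root[owner]
--             if rx != ry:
--                 root = {k: (ry if v == rx else v) for k, v in root.items()}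
--     groups = {}
--     for element in elements:
--         groups.setdefault(root[element], []).append(element)
--     return list(groups.values())
-- ===== Notes on version B (the rewrite author's own statement) =====
-- stated objective: alternative
-- what changed: Replaces the union-find forest (parent dict, recursive find with path compression, union by root reassignment) with a flat quick-find map element->representative rebuilt by eager relabelling on each merge; the grouping pass then just reads the flat map instead of running find.
import Mathlib
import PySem

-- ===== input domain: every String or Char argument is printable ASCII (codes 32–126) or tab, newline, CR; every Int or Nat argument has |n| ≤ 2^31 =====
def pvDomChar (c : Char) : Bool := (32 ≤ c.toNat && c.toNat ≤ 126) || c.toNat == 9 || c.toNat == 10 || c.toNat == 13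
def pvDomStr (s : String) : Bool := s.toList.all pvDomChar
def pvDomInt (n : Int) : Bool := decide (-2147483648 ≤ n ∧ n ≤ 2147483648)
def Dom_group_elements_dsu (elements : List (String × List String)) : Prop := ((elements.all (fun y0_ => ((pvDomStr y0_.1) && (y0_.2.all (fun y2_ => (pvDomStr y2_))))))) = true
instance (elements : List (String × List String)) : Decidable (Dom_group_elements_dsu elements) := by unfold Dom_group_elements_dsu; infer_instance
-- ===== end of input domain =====

-- B replaces A's union-find forest (recursive find with path compression) by a flat
-- element→representative map with eager relabelling on each merge (quick-find); same output.

-- ===== PORT A =====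
-- DSU.find: Python's recursion terminates because parent chains are acyclic; the port
-- carries fuel, and fuel = size+1 at every call site is proved sufficient below (dsuFind_spec).
def dsuFind : Nat → PySem.Dict String String → String → PySem.Dict String String × String
  | 0, p, x => (p, x)      -- never reached with the call-site fuel (proved below)
  | fuel+1, p, x =>
    let p1 := if p.contains x then p else p.insert x x
    let px := p1.getD x x
    if px ≠ x then
      let res := dsuFind fuel p1 px
      (res.1.insert x res.2, res.2)
    else (p1, px)

-- DSU.union: Python evaluates the RHS find(y) first, then the target subscript find(x)
def dsuUnion (p : PySem.Dict String String) (x y : String) : PySem.Dict String String :=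
  let ra := dsuFind (p.size + 1) p y
  let rb := dsuFind (ra.1.size + 1) ra.1 x
  rb.1.insert rb.2 ra.2

def stepAProp (e : String) (st : PySem.Dict String String × PySem.Dict String String)
    (prop : String) : PySem.Dict String String × PySem.Dict String String :=
  match st.2.get? prop with
  | some owner => (dsuUnion st.1 e owner, st.2)
  | none => (st.1, st.2.insert prop e)

def stepA (st : PySem.Dict String String × PySem.Dict String String)
    (ep : String × List String) : PySem.Dict String String × PySem.Dict String String :=
  ep.2.foldl (stepAProp ep.1) st

def stepA2 (st : PySem.Dict String String × PySem.Dict String (List String))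
    (ep : String × List String) : PySem.Dict String String × PySem.Dict String (List String) :=
  let fr := dsuFind (st.1.size + 1) st.1 ep.1
  (fr.1, st.2.modify fr.2 [] (· ++ [ep.1]))

def group_elements_dsu (elements : List (String × List String)) : List (List String) :=
  let st := elements.foldl stepA (PySem.Dict.empty, PySem.Dict.empty)
  let fin := elements.foldl stepA2 (st.1, PySem.Dict.empty)
  fin.2.values

-- ===== PORT B =====
-- root = {k: (ry if v == rx else v) for k, v in root.items()}
def relabelMap (f : PySem.Dict String String) (rx ry : String) : PySem.Dict String String :=
  PySem.Dict.mk (f.items.map (fun kv => if kv.2 = rx then (kv.1, ry) else kv))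

def stepBProp (e : String) (st : PySem.Dict String String × PySem.Dict String String)
    (prop : String) : PySem.Dict String String × PySem.Dict String String :=
  let po := st.2.setdefault prop e
  let owner := po.getD prop ""
  let rx := st.1.getD e ""
  let ry := st.1.getD owner ""
  if rx ≠ ry then (relabelMap st.1 rx ry, po) else (st.1, po)

def stepB (st : PySem.Dict String String × PySem.Dict String String)
    (ep : String × List String) : PySem.Dict String String × PySem.Dict String String :=
  ep.2.foldl (stepBProp ep.1) st

def group_elements_dsu_alt (elements : List (String × List String)) : List (List String) :=
  let root0 : PySem.Dict String String :=
    elements.foldl (fun d ep => d.insert ep.1 ep.1) PySem.Dict.empty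
  let st := elements.foldl stepB (root0, PySem.Dict.empty)
  let groups := elements.foldl
    (fun (g : PySem.Dict String (List String)) ep =>
      g.modify (st.1.getD ep.1 "") [] (· ++ [ep.1])) PySem.Dict.empty
  groups.values

-- ===== PRECONDITION & SPEC =====
def Spec_group_elements_dsu (elements : List (String × List String)) (out : List (List String)) : Prop :=
  out = group_elements_dsu_alt elements
instance (elements : List (String × List String)) (out : List (List String)) : Decidable (Spec_group_elements_dsu elements out) := by
  unfold Spec_group_elements_dsu; infer_instance

-- ===== CLAIM (what is proved, stated in full; the proofs are below) =====
def Claim_equal_group_elements_dsu : Prop := ∀ (elements : List (String × List String)), Dom_group_elements_dsu elements → Spec_group_elements_dsu elements (group_elements_dsu elements)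

-- ===== LEMMAS AND PROOFS =====

-- Pure specification of a parent chain: follow parents for at most `fuel` steps.
def rootN : Nat → PySem.Dict String String → String → Option String
  | 0, _, _ => none
  | n+1, p, x =>
    match p.get? x with
    | none => some x
    | some px => if px = x then some x else rootN n p px

-- number of parent-dict keys in z's class under the flat map f
def classCount (p f : PySem.Dict String String) (z : String) : Nat :=
  (p.keys.filter (fun k => f.getD k k == f.getD z z)).length

-- the central invariant: every chain in A's parent dict terminates, at B's flat root,
-- within (size of its class) + 1 steps
def DsuInv (p f : PySem.Dict String String) : Prop :=
  ∀ z, ∃ n, rootN n p z = some (f.getD z z) ∧ n ≤ classCount p f z + 1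

def Good (p f : PySem.Dict String String) : Prop :=
  DsuInv p f ∧ p.keys.Nodup

-- B's flat map: every stored value is itself a fixpoint key
def FlatD (f : PySem.Dict String String) : Prop :=
  ∀ k v, f.get? k = some v → f.get? v = some v

theorem rootN_step {p : PySem.Dict String String} {z pz : String}
    (h : p.get? z = some pz) (hne : pz ≠ z) (n : Nat) :
    rootN (n+1) p z = rootN n p pz := by
  simp [rootN, h, if_neg hne]

theorem rootN_fix {p : PySem.Dict String String} {z : String}
    (h : p.get? z = some z) (n : Nat) : rootN (n+1) p z = some z := by
  simp [rootN, h]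

theorem rootN_base {p : PySem.Dict String String} {z : String}
    (h : p.get? z = none) (n : Nat) : rootN (n+1) p z = some z := by
  simp [rootN, h]

theorem rootN_mono {p : PySem.Dict String String} {z w : String} {m n : Nat}
    (h : m ≤ n) (hw : rootN m p z = some w) : rootN n p z = some w := by
    induction m generalizing n z with
  | zero => simp [rootN] at hw
  | succ m ih =>
    cases n with
    | zero => omega
    | succ n =>
      simp only [rootN] at hw ⊢
      cases hpz : p.get? z with
      | none => simpa [hpz] using (by simpa [hpz] using hw)
      | some pz =>
        simp only [hpz] at hw ⊢
        by_cases hzz : pz = z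
        · simpa [hzz] using (by simpa [hzz] using hw)
        · simp only [if_neg hzz] at hw ⊢
          exact ih (by omega) hw

theorem rootN_unique {p : PySem.Dict String String} {z w w' : String} {m n : Nat}
    (h1 : rootN m p z = some w) (h2 : rootN n p z = some w') : w = w' := by
  have a1 := rootN_mono (Nat.le_max_left m n) h1
  have a2 := rootN_mono (Nat.le_max_right m n) h2
  rw [a1] at a2; exact (Option.some_inj.mp a2)

theorem rootN_terminal {p : PySem.Dict String String} {z w : String} {n : Nat}
    (h : rootN n p z = some w) : p.get? w = none ∨ p.get? w = some w := by
  induction n generalizing z with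
  | zero => simp [rootN] at h
  | succ n ih =>
    simp only [rootN] at h
    cases hpz : p.get? z with
    | none => simp [hpz] at h; subst h; exact Or.inl hpz
    | some pz =>
      simp only [hpz] at h
      by_cases hzz : pz = z
      · simp [hzz] at h; subst h; exact Or.inr (hzz ▸ hpz)
      · simp only [if_neg hzz] at h; exact ih h

theorem rootN_congr {p p' : PySem.Dict String String}
    (h : ∀ k, p.get? k = p'.get? k) : ∀ n z, rootN n p z = rootN n p' z := by
  intro n
  induction n with
  | zero => intro z; rfl
  | succ n ih =>
    intro z
    simp only [rootN, ← h z]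
    cases hpz : p.get? z with
    | none => rfl
    | some pz =>
      by_cases hzz : pz = z
      · simp [hzz]
      · simp [if_neg hzz, ih]

theorem rootN_insert_fresh {p : PySem.Dict String String} {x : String}
    (h : p.get? x = none) : ∀ n z, rootN n (p.insert x x) z = rootN n p z := by
  intro n
  induction n with
  | zero => intro z; rfl
  | succ n ih =>
    intro z
    simp only [rootN, PySem.Dict.get?_insert]
    by_cases hzx : z = x
    · subst hzx; simp [h]
    · simp only [if_neg hzx]
      cases hpz : p.get? z with
      | none => rfl
      | some pz =>
        by_cases hzz : pz = z
        · simp [hzz]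
        · simp [if_neg hzz, ih]

theorem rootN_compress {p : PySem.Dict String String} {r x : String} {m : Nat}
    (hterm : p.get? r = some r) (hne : r ≠ x) (hx : rootN m p x = some r) :
    ∀ n z w, rootN n p z = some w → rootN n (p.insert x r) z = some w := by
  intro n
  induction n with
  | zero => intro z w hw; simp [rootN] at hw
  | succ n ih =>
    intro z w hw
    simp only [rootN, PySem.Dict.get?_insert] at hw ⊢
    by_cases hzx : z = x
    · subst hzx
      -- x's old chain goes to r; new: z → r directly
      cases hm : p.get? z with
      | none =>
        -- then rootN at z would be some z, so r = z, contradiction with hne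
        obtain ⟨m', rfl⟩ : ∃ m', m = m' + 1 := by
          cases m with
          | zero => simp [rootN] at hx
          | succ m' => exact ⟨m', rfl⟩
        simp [rootN, hm] at hx
        exact absurd hx.symm hne
      | some px =>
        obtain ⟨m', rfl⟩ : ∃ m', m = m' + 1 := by
          cases m with
          | zero => simp [rootN] at hx
          | succ m' => exact ⟨m', rfl⟩
        simp only [rootN, hm] at hx hw
        by_cases hpx : px = z
        · simp [hpx] at hx; exact absurd hx.symm hne
        · simp only [if_neg hpx] at hx hw
          -- w = r by uniqueness
          have hwr : w = r := rootN_unique hw hx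
          subst hwr
          -- goal: rootN n (p.insert x r) r = some r ; n ≥ 1 since rootN n p px = some
          obtain ⟨n', rfl⟩ : ∃ n', n = n' + 1 := by
            cases n with
            | zero => simp [rootN] at hw
            | succ n' => exact ⟨n', rfl⟩
          simp [rootN, PySem.Dict.get?_insert, if_neg hne, hterm]
    · simp only [if_neg hzx] at hw ⊢
      cases hpz : p.get? z with
      | none => simpa [hpz] using (by simpa [hpz] using hw)
      | some pz =>
        simp only [hpz] at hw ⊢
        by_cases hzz : pz = z
        · simpa [hzz] using (by simpa [hzz] using hw)
        · simp only [if_neg hzz] at hw ⊢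
          exact ih pz w hw

theorem rootN_relink {p : PySem.Dict String String} {rx ry : String}
    (hrx : p.get? rx = some rx) (hry : p.get? ry = some ry) (hne : rx ≠ ry) :
    ∀ n z w, rootN n p z = some w →
      (w = rx → rootN (n+1) (p.insert rx ry) z = some ry) ∧
      (w ≠ rx → rootN n (p.insert rx ry) z = some w) := by
  intro n
  induction n with
  | zero => intro z w hw; simp [rootN] at hw
  | succ n ih =>
    intro z w hw
    simp only [rootN] at hw
    by_cases hzx : z = rx
    · subst hzx
      simp only [hrx] at hw
      replace hw : w = z := by simpa using hw.symm
      refine ⟨fun _ => ?_, fun hc => absurd hw hc⟩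
      -- chain rx → ry → ry
      have h1 : (p.insert z ry).get? z = some ry := by simp
      have h2 : (p.insert z ry).get? ry = some ry := by
        simp [PySem.Dict.get?_insert, hry]
      rw [rootN_step h1 (Ne.symm hne), rootN_fix h2]
    · cases hpz : p.get? z with
      | none =>
        simp only [hpz] at hw
        replace hw : w = z := by simpa using hw.symm
        subst hw
        have hz' : (p.insert rx ry).get? w = none := by
          simp [PySem.Dict.get?_insert, if_neg hzx, hpz]
        constructor
        · intro hc; exact absurd hc hzx
        · intro _; simp [rootN, hz']
      | some pz =>
        simp only [hpz] at hw
        by_cases hzz : pz = z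
        · simp only [if_pos hzz] at hw
          replace hw : w = z := by simpa using hw.symm
          subst hw
          have hz' : (p.insert rx ry).get? w = some w := by
            simp [PySem.Dict.get?_insert, if_neg hzx, hzz ▸ hpz]
          constructor
          · intro hc; exact absurd hc hzx
          · intro _; simp [rootN, hz']
        · simp only [if_neg hzz] at hw
          have hz' : (p.insert rx ry).get? z = some pz := by
            simp [PySem.Dict.get?_insert, if_neg hzx, hpz]
          obtain ⟨c1, c2⟩ := ih pz w hw
          constructor
          · intro hwx
            rw [rootN_step hz' hzz]
            exact c1 hwx
          · intro hwx
            rw [rootN_step hz' hzz]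
            exact c2 hwx

theorem filter_len_mono {l : List String} {q1 q2 : String → Bool}
    (h : ∀ a ∈ l, q1 a = true → q2 a = true) :
    (l.filter q1).length ≤ (l.filter q2).length := by
  induction l with
  | nil => simp
  | cons a l ih =>
    have ih' := ih (fun b hb h1 => h b (List.mem_cons_of_mem _ hb) h1)
    simp only [List.filter_cons]
    by_cases h1 : q1 a = true
    · have h2 := h a List.mem_cons_self h1
      simp [h1, h2]; omega
    · rw [Bool.not_eq_true] at h1
      rw [h1]
      cases h2 : q2 a
      · simpa using ih'
      · simp; omega

theorem filter_len_lt {l : List String} {q1 q2 : String → Bool} {a : String}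
    (h : ∀ b ∈ l, q1 b = true → q2 b = true) (ha : a ∈ l)
    (h1 : q1 a = false) (h2 : q2 a = true) :
    (l.filter q1).length < (l.filter q2).length := by
  induction l with
  | nil => simp at ha
  | cons c l ih =>
    simp only [List.filter_cons]
    rcases List.mem_cons.mp ha with rfl | hmem
    · rw [h1, h2]
      have hm := filter_len_mono (l := l) (q1 := q1) (q2 := q2)
        (fun b hb hq => h b (List.mem_cons_of_mem _ hb) hq)
      simp; omega
    · have ih' := ih (fun b hb hq => h b (List.mem_cons_of_mem _ hb) hq) hmem
      by_cases hq1 : q1 c = true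
      · have hq2 := h c List.mem_cons_self hq1
        simp [hq1, hq2]; omega
      · rw [Bool.not_eq_true] at hq1
        rw [hq1]
        cases hq2 : q2 c
        · simpa using ih'
        · simp; omega

theorem dsuFind_spec : ∀ (fuel : Nat) (p : PySem.Dict String String) (x r : String),
    rootN fuel p x = some r →
    (dsuFind fuel p x).2 = r ∧
    (∀ z n w, rootN n p z = some w → rootN n (dsuFind fuel p x).1 z = some w) ∧
    (dsuFind fuel p x).1.get? r = some r ∧
    (∀ k, k ∈ p.keys → k ∈ (dsuFind fuel p x).1.keys) ∧
    (∀ k, p.get? k = some k → (dsuFind fuel p x).1.get? k = some k) ∧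
    (p.keys.Nodup → (dsuFind fuel p x).1.keys.Nodup) := by
  intro fuel
  induction fuel with
  | zero => intro p x r h; simp [rootN] at h
  | succ fuel ih =>
    intro p x r hroot
    by_cases hc : p.contains x = true
    · obtain ⟨px, hpx⟩ : ∃ px, p.get? x = some px := by
        rw [PySem.Dict.contains_eq_isSome_get?] at hc
        cases h : p.get? x with
        | none => rw [h] at hc; simp at hc
        | some px => exact ⟨px, rfl⟩
      by_cases hxx : px = x
      · have hfind : dsuFind (fuel+1) p x = (p, x) := by
          simp [dsuFind, hc, PySem.Dict.getD_of_get?_eq_some _ _ hpx, hxx]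
        have hrx : r = x := by
          rw [rootN_fix (hxx ▸ hpx)] at hroot
          exact (Option.some_inj.mp hroot).symm
        rw [hfind]; subst hrx
        exact ⟨rfl, fun z n w h => h, hxx ▸ hpx, fun k hk => hk, fun k hk => hk, id⟩
      · have hroot' : rootN fuel p px = some r := by
          rw [rootN_step hpx hxx] at hroot; exact hroot
        obtain ⟨h2eq, h2pres, h2get, h2keys, h2term, h2nodup⟩ := ih p px r hroot'
        have hrne : r ≠ x := by
          rcases rootN_terminal hroot' with h | h
          · intro e; rw [e, hpx] at h; cases h
          · intro e; rw [e, hpx] at h; exact hxx (Option.some_inj.mp h)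
        have hfind : dsuFind (fuel+1) p x =
            ((dsuFind fuel p px).1.insert x (dsuFind fuel p px).2,
              (dsuFind fuel p px).2) := by
          simp [dsuFind, hc, PySem.Dict.getD_of_get?_eq_some _ _ hpx, hxx]
        rw [hfind, h2eq]
        have hx2 : rootN (fuel+1) (dsuFind fuel p px).1 x = some r :=
          h2pres x (fuel+1) r hroot
        refine ⟨rfl, ?_, ?_, ?_, ?_, ?_⟩
        · intro z n w h
          exact rootN_compress h2get hrne hx2 n z w (h2pres z n w h)
        · rw [PySem.Dict.get?_insert, if_neg hrne]; exact h2get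
        · intro k hk
          exact (PySem.Dict.mem_keys_insert _ _ _ _).mpr (Or.inr (h2keys k hk))
        · intro k hk
          have hkx : k ≠ x := by
            intro e; rw [e, hpx] at hk; exact hxx (Option.some_inj.mp hk)
          rw [PySem.Dict.get?_insert, if_neg hkx]; exact h2term k hk
        · intro h; exact PySem.Dict.nodup_keys_insert _ _ _ (h2nodup h)
    · have hx0 : p.get? x = none := by
        rw [PySem.Dict.contains_eq_isSome_get?] at hc
        cases h : p.get? x with
        | none => rfl
        | some px => rw [h] at hc; simp at hc
      have hrx : r = x := by
        rw [rootN_base hx0] at hroot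
        exact (Option.some_inj.mp hroot).symm
      subst hrx
      have hfind : dsuFind (fuel+1) p r = (p.insert r r, r) := by
        simp [dsuFind, hc, PySem.Dict.getD_insert_self]
      rw [hfind]
      refine ⟨rfl, ?_, ?_, ?_, ?_, ?_⟩
      · intro z n w h; rw [rootN_insert_fresh hx0]; exact h
      · rw [PySem.Dict.get?_insert, if_pos rfl]
      · intro k hk; exact (PySem.Dict.mem_keys_insert _ _ _ _).mpr (Or.inr hk)
      · intro k hk
        have hkx : k ≠ r := by intro e; rw [e, hx0] at hk; cases hk
        rw [PySem.Dict.get?_insert, if_neg hkx]; exact hk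
      · intro h; exact PySem.Dict.nodup_keys_insert _ _ _ h

theorem keys_length_eq_size (p : PySem.Dict String String) : p.keys.length = p.size := by
  simp [PySem.Dict.keys, PySem.Dict.size]

theorem getD_indep {f : PySem.Dict String String} {k : String} (h : k ∈ f.keys)
    (a b : String) : f.getD k a = f.getD k b := by
  cases hk : f.get? k with
  | none => exact absurd ((PySem.Dict.get?_eq_none_iff_not_mem_keys f k).mp hk) (by simpa using h)
  | some v => rw [PySem.Dict.getD_of_get?_eq_some f a hk, PySem.Dict.getD_of_get?_eq_some f b hk]

theorem get?_relabelMap (f : PySem.Dict String String) (rx ry k : String) :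
    (relabelMap f rx ry).get? k = (f.get? k).map (fun v => if v = rx then ry else v) := by
  obtain ⟨l⟩ := f
  induction l with
  | nil => simp [relabelMap, PySem.Dict.get?]
  | cons a l ih =>
    obtain ⟨ka, va⟩ := a
    simp only [relabelMap, List.map_cons] at ih ⊢
    by_cases hv : va = rx
    · by_cases hk : ka == k
      · simp [PySem.Dict.get?_mk_cons, hk, hv]
      · simpa [PySem.Dict.get?_mk_cons, hk, hv] using ih
    · by_cases hk : ka == k
      · simp [PySem.Dict.get?_mk_cons, hk, if_neg hv]
      · simpa [PySem.Dict.get?_mk_cons, hk, if_neg hv] using ih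

theorem keys_relabelMap (f : PySem.Dict String String) (rx ry : String) :
    (relabelMap f rx ry).keys = f.keys := by
  simp only [relabelMap, PySem.Dict.keys, List.map_map]
  apply List.map_congr_left
  intro kv _
  by_cases hv : kv.2 = rx <;> simp [hv]

theorem getD_relabelMap (f : PySem.Dict String String) (rx ry z : String) (hrx : rx ∈ f.keys) :
    (relabelMap f rx ry).getD z z = if f.getD z z = rx then ry else f.getD z z := by
  cases hz : f.get? z with
  | none =>
    have h1 : (relabelMap f rx ry).get? z = none := by
      rw [get?_relabelMap, hz]; rfl
    have hzk : z ∉ f.keys := (PySem.Dict.get?_eq_none_iff_not_mem_keys f z).mp hz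
    have hzrx : z ≠ rx := fun h => hzk (h ▸ hrx)
    rw [PySem.Dict.getD_of_get?_eq_none _ _ h1, PySem.Dict.getD_of_get?_eq_none _ _ hz,
      if_neg hzrx]
  | some v =>
    have h1 : (relabelMap f rx ry).get? z = some (if v = rx then ry else v) := by
      rw [get?_relabelMap, hz]; rfl
    rw [PySem.Dict.getD_of_get?_eq_some _ _ h1, PySem.Dict.getD_of_get?_eq_some _ _ hz]

theorem flat_relabelMap {f : PySem.Dict String String} {rx ry : String}
    (hF : FlatD f) (hry : f.get? ry = some ry) (hne : ry ≠ rx) :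
    FlatD (relabelMap f rx ry) := by
  intro k v hkv
  rw [get?_relabelMap] at hkv
  cases hk : f.get? k with
  | none => rw [hk] at hkv; simp at hkv
  | some v0 =>
    rw [hk] at hkv
    simp only [Option.map_some, Option.some_inj] at hkv
    rw [get?_relabelMap]
    by_cases hv0 : v0 = rx
    · rw [if_pos hv0] at hkv
      subst hkv
      rw [hry]
      simp [hne]
    · rw [if_neg hv0] at hkv
      subst hkv
      rw [hF k v0 hk]
      simp [if_neg hv0]

theorem froot_mem_keys {f : PySem.Dict String String} (hF : FlatD f) {x : String}
    (hx : x ∈ f.keys) : f.get? (f.getD x x) = some (f.getD x x) ∧ f.getD x x ∈ f.keys := by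
  cases hk : f.get? x with
  | none => exact absurd ((PySem.Dict.get?_eq_none_iff_not_mem_keys f x).mp hk) (by simpa using hx)
  | some v =>
    rw [PySem.Dict.getD_of_get?_eq_some _ _ hk]
    have hv := hF x v hk
    refine ⟨hv, ?_⟩
    by_contra hmem
    exact absurd hv (by simp [(PySem.Dict.get?_eq_none_iff_not_mem_keys f v).mpr hmem])

theorem find_good {p f : PySem.Dict String String} (hG : Good p f) (x : String) :
    (dsuFind (p.size + 1) p x).2 = f.getD x x ∧
    Good (dsuFind (p.size + 1) p x).1 f ∧
    (dsuFind (p.size + 1) p x).1.get? (f.getD x x) = some (f.getD x x) ∧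
    (∀ k, p.get? k = some k → (dsuFind (p.size + 1) p x).1.get? k = some k) ∧
    (∀ k, k ∈ p.keys → k ∈ (dsuFind (p.size + 1) p x).1.keys) := by
  obtain ⟨hInv, hNd⟩ := hG
  obtain ⟨n, hr, hb⟩ := hInv x
  have hcc : classCount p f x ≤ p.keys.length := List.length_filter_le _ _
  have hfuel : n ≤ p.size + 1 := by rw [keys_length_eq_size] at hcc; omega
  have hroot : rootN (p.size+1) p x = some (f.getD x x) := rootN_mono hfuel hr
  obtain ⟨h1, h2, h3, h4, h5, h6⟩ := dsuFind_spec (p.size+1) p x _ hroot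
  refine ⟨h1, ⟨?_, h6 hNd⟩, h3, h5, h4⟩
  intro z
  obtain ⟨m, hrz, hbz⟩ := hInv z
  refine ⟨m, h2 z m _ hrz, ?_⟩
  have hmono : classCount p f z ≤ classCount (dsuFind (p.size+1) p x).1 f z := by
    unfold classCount
    have hnd := hNd.filter (fun k => f.getD k k == f.getD z z)
    have hsubf : p.keys.filter (fun k => f.getD k k == f.getD z z) ⊆
        (dsuFind (p.size+1) p x).1.keys.filter (fun k => f.getD k k == f.getD z z) := by
      intro a ha
      rw [List.mem_filter] at ha ⊢
      exact ⟨h4 a ha.1, ha.2⟩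
    exact (hnd.subperm hsubf).length_le
  omega

theorem union_spec {p f : PySem.Dict String String} (hG : Good p f) (hF : FlatD f)
    {x y : String} (hx : x ∈ f.keys) (hy : y ∈ f.keys) :
    Good (dsuUnion p x y)
      (if f.getD x x = f.getD y y then f else relabelMap f (f.getD x x) (f.getD y y)) := by
  obtain ⟨e1, G1, t1, tp1, kp1⟩ := find_good hG y
  obtain ⟨e2, G2, t2, tp2, kp2⟩ := find_good G1 x
  set rx := f.getD x x with hrxdef
  set ry := f.getD y y with hrydef
  set pa := (dsuFind (p.size+1) p y).1 with hpa
  set pb := (dsuFind (pa.size+1) pa x).1 with hpb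
  have hryb : pb.get? ry = some ry := tp2 ry t1
  have hrxb : pb.get? rx = some rx := t2
  have hU : dsuUnion p x y = pb.insert rx ry := by
    simp only [dsuUnion]
    rw [e1, e2]
  rw [hU]
  obtain ⟨Inv2, Nd2⟩ := G2
  have hcont : pb.contains rx = true := by
    rw [PySem.Dict.contains_eq_isSome_get?, hrxb]; rfl
  have hkeys : (pb.insert rx ry).keys = pb.keys :=
    PySem.Dict.keys_insert_of_contains _ _ hcont
  by_cases heq : rx = ry
  · rw [if_pos heq]
    have hcong : ∀ k, pb.get? k = (pb.insert rx ry).get? k := by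
      intro k
      rw [PySem.Dict.get?_insert]
      by_cases hk : k = rx
      · rw [if_pos hk, hk, hrxb, heq]
      · rw [if_neg hk]
    refine ⟨?_, PySem.Dict.nodup_keys_insert _ _ _ Nd2⟩
    intro z
    obtain ⟨n, hr, hb⟩ := Inv2 z
    refine ⟨n, by rw [← rootN_congr hcong n z]; exact hr, ?_⟩
    unfold classCount at hb ⊢
    rw [hkeys]
    exact hb
  · rw [if_neg heq]
    have hrxk : rx ∈ f.keys := (froot_mem_keys hF hx).2
    have hryk : ry ∈ f.keys := (froot_mem_keys hF hy).2
    have hfry : f.get? ry = some ry := (froot_mem_keys hF hy).1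
    have hgdry : f.getD ry ry = ry := PySem.Dict.getD_of_get?_eq_some _ _ hfry
    have hrypb : ry ∈ pb.keys := by
      have hmem : ry ∈ pa.keys := by
        by_contra hmem
        rw [(PySem.Dict.get?_eq_none_iff_not_mem_keys pa ry).mpr hmem] at t1
        cases t1
      exact kp2 ry hmem
    refine ⟨?_, PySem.Dict.nodup_keys_insert _ _ _ Nd2⟩
    intro z
    obtain ⟨n, hr, hb⟩ := Inv2 z
    have hrel := rootN_relink hrxb hryb heq n z _ hr
    have hgd : (relabelMap f rx ry).getD z z = if f.getD z z = rx then ry else f.getD z z :=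
      getD_relabelMap f rx ry z hrxk
    have htrans : ∀ b, f.getD b b = f.getD z z →
        (relabelMap f rx ry).getD b b = (relabelMap f rx ry).getD z z := by
      intro b hbz
      rw [getD_relabelMap f rx ry b hrxk, hgd, hbz]
    have himp : ∀ b ∈ pb.keys, (f.getD b b == f.getD z z) = true →
        ((relabelMap f rx ry).getD b b == (relabelMap f rx ry).getD z z) = true := by
      intro b _ hbz
      rw [beq_iff_eq] at hbz ⊢
      exact htrans b hbz
    by_cases hzc : f.getD z z = rx
    · refine ⟨n+1, ?_, ?_⟩
      · rw [hgd, if_pos hzc]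
        exact hrel.1 hzc
      · have hlt : classCount pb f z <
            classCount (pb.insert rx ry) (relabelMap f rx ry) z := by
          unfold classCount
          rw [hkeys]
          refine filter_len_lt himp hrypb ?_ ?_
          · rw [beq_eq_false_iff_ne, Ne, hgdry, hzc]
            exact fun h => heq h.symm
          · rw [beq_iff_eq, getD_relabelMap f rx ry ry hrxk, hgd, if_pos hzc,
              hgdry, if_neg (fun h => heq h.symm)]
        omega
    · refine ⟨n, ?_, ?_⟩
      · rw [hgd, if_neg hzc]
        exact hrel.2 hzc
      · have hle : classCount pb f z ≤
            classCount (pb.insert rx ry) (relabelMap f rx ry) z := by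
          unfold classCount
          rw [hkeys]
          exact filter_len_mono himp
        omega

theorem stepProp_sim {p f d : PySem.Dict String String} {e prop : String}
    (hG : Good p f) (hF : FlatD f) (he : e ∈ f.keys)
    (hd : ∀ v ∈ d.values, v ∈ f.keys) :
    (stepAProp e (p, d) prop).2 = (stepBProp e (f, d) prop).2 ∧
    Good (stepAProp e (p, d) prop).1 (stepBProp e (f, d) prop).1 ∧
    FlatD (stepBProp e (f, d) prop).1 ∧
    (stepBProp e (f, d) prop).1.keys = f.keys ∧
    (∀ v ∈ (stepAProp e (p, d) prop).2.values, v ∈ f.keys) := by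
  unfold stepAProp stepBProp
  cases hprop : d.get? prop with
  | none =>
    have hc : d.contains prop = false := by
      rw [PySem.Dict.contains_eq_isSome_get?, hprop]; rfl
    simp only [PySem.Dict.setdefault_of_not_contains _ _ hc,
      PySem.Dict.getD_insert_self]
    rw [if_neg (fun h => h rfl)]
    refine ⟨rfl, hG, hF, rfl, ?_⟩
    intro v hv
    rcases PySem.Dict.mem_values_insert _ _ _ _ hv with rfl | hv'
    · exact he
    · exact hd v hv'
  | some owner =>
    have hc : d.contains prop = true := by
      rw [PySem.Dict.contains_eq_isSome_get?, hprop]; rfl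
    have hok : owner ∈ f.keys := by
      apply hd
      have := PySem.Dict.mem_items_of_get?_eq_some d hprop
      simp only [PySem.Dict.values]
      exact List.mem_map.mpr ⟨(prop, owner), this, rfl⟩
    simp only [PySem.Dict.setdefault_of_contains _ _ hc,
      PySem.Dict.getD_of_get?_eq_some _ _ hprop]
    rw [getD_indep he "" e, getD_indep hok "" owner]
    have hu := union_spec hG hF (x := e) (y := owner) he hok
    by_cases hif : f.getD e e = f.getD owner owner
    · rw [if_pos hif] at hu
      rw [if_neg (fun h => h hif)]
      exact ⟨rfl, hu, hF, rfl, hd⟩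
    · rw [if_neg hif] at hu
      rw [if_pos hif]
      refine ⟨rfl, hu, ?_, keys_relabelMap f _ _, hd⟩
      exact flat_relabelMap hF (froot_mem_keys hF hok).1 (fun h => hif h.symm)

theorem loop1p_sim (props : List String) : ∀ (p f d : PySem.Dict String String) (e : String),
    Good p f → FlatD f → e ∈ f.keys → (∀ v ∈ d.values, v ∈ f.keys) →
    (props.foldl (stepAProp e) (p, d)).2 = (props.foldl (stepBProp e) (f, d)).2 ∧
    Good (props.foldl (stepAProp e) (p, d)).1 (props.foldl (stepBProp e) (f, d)).1 ∧
    FlatD (props.foldl (stepBProp e) (f, d)).1 ∧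
    (props.foldl (stepBProp e) (f, d)).1.keys = f.keys ∧
    (∀ v ∈ (props.foldl (stepAProp e) (p, d)).2.values, v ∈ f.keys) := by
  induction props with
  | nil => intro p f d e hG hF he hd; exact ⟨rfl, hG, hF, rfl, hd⟩
  | cons prop props ih =>
    intro p f d e hG hF he hd
    obtain ⟨h1, h2, h3, h4, h5⟩ := stepProp_sim (prop := prop) hG hF he hd
    simp only [List.foldl_cons]
    have hstA : stepAProp e (p, d) prop =
        ((stepAProp e (p, d) prop).1, (stepBProp e (f, d) prop).2) := Prod.ext rfl h1
    rw [hstA]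
    have hd' : ∀ v ∈ (stepBProp e (f, d) prop).2.values, v ∈ (stepBProp e (f, d) prop).1.keys := by
      intro v hv; rw [h4]; exact h5 v (h1 ▸ hv)
    obtain ⟨g1, g2, g3, g4, g5⟩ := ih (stepAProp e (p, d) prop).1
      (stepBProp e (f, d) prop).1 (stepBProp e (f, d) prop).2 e h2 h3 (h4.symm ▸ he) hd'
    exact ⟨g1, g2, g3, g4.trans h4, fun v hv => h4 ▸ g5 v hv⟩

theorem loop1_sim (L : List (String × List String)) : ∀ (p f d : PySem.Dict String String),
    Good p f → FlatD f → (∀ ep ∈ L, ep.1 ∈ f.keys) → (∀ v ∈ d.values, v ∈ f.keys) →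
    (L.foldl stepA (p, d)).2 = (L.foldl stepB (f, d)).2 ∧
    Good (L.foldl stepA (p, d)).1 (L.foldl stepB (f, d)).1 ∧
    FlatD (L.foldl stepB (f, d)).1 ∧
    (L.foldl stepB (f, d)).1.keys = f.keys ∧
    (∀ v ∈ (L.foldl stepA (p, d)).2.values, v ∈ f.keys) := by
  induction L with
  | nil => intro p f d hG hF hK hd; exact ⟨rfl, hG, hF, rfl, hd⟩
  | cons ep L ih =>
    intro p f d hG hF hK hd
    obtain ⟨h1, h2, h3, h4, h5⟩ :=
      loop1p_sim ep.2 p f d ep.1 hG hF (hK ep List.mem_cons_self) hd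
    simp only [List.foldl_cons]
    simp only [stepA, stepB]
    have hstA : ep.2.foldl (stepAProp ep.1) (p, d) =
        ((ep.2.foldl (stepAProp ep.1) (p, d)).1, (ep.2.foldl (stepBProp ep.1) (f, d)).2) :=
      Prod.ext rfl h1
    rw [hstA]
    have hd' : ∀ v ∈ (ep.2.foldl (stepBProp ep.1) (f, d)).2.values,
        v ∈ (ep.2.foldl (stepBProp ep.1) (f, d)).1.keys := by
      intro v hv; rw [h4]; exact h5 v (h1 ▸ hv)
    have hK' : ∀ ep' ∈ L, ep'.1 ∈ (ep.2.foldl (stepBProp ep.1) (f, d)).1.keys := by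
      intro ep' hep'; rw [h4]; exact hK ep' (List.mem_cons_of_mem _ hep')
    obtain ⟨g1, g2, g3, g4, g5⟩ := ih (ep.2.foldl (stepAProp ep.1) (p, d)).1
      (ep.2.foldl (stepBProp ep.1) (f, d)).1 (ep.2.foldl (stepBProp ep.1) (f, d)).2
      h2 h3 hK' hd'
    exact ⟨g1, g2, g3, g4.trans h4, fun v hv => h4 ▸ g5 v hv⟩

theorem loop2_sim (L : List (String × List String)) :
    ∀ (p f : PySem.Dict String String) (g : PySem.Dict String (List String)),
    Good p f → (∀ ep ∈ L, ep.1 ∈ f.keys) →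
    (L.foldl stepA2 (p, g)).2 =
      L.foldl (fun g ep => g.modify (f.getD ep.1 "") [] (· ++ [ep.1])) g := by
  induction L with
  | nil => intro p f g hG hK; rfl
  | cons ep L ih =>
    intro p f g hG hK
    obtain ⟨e1, G1, t1, tp1, kp1⟩ := find_good hG ep.1
    simp only [List.foldl_cons]
    have hpair : stepA2 (p, g) ep =
        ((dsuFind (p.size + 1) p ep.1).1, g.modify (f.getD ep.1 "") [] (· ++ [ep.1])) := by
      simp only [stepA2]
      rw [e1, getD_indep (hK ep List.mem_cons_self) ep.1 ""]
    rw [hpair]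
    exact ih _ f _ G1 (fun ep' hep' => hK ep' (List.mem_cons_of_mem _ hep'))

theorem root0_get? (L : List (String × List String)) :
    ∀ (d : PySem.Dict String String) (k : String),
    (L.foldl (fun d ep => d.insert ep.1 ep.1) d).get? k =
      if k ∈ L.map (·.1) then some k else d.get? k := by
  induction L with
  | nil => intro d k; simp
  | cons ep L ih =>
    intro d k
    simp only [List.foldl_cons, List.map_cons, List.mem_cons]
    rw [ih]
    by_cases hk : k ∈ L.map (·.1)
    · simp [hk]
    · rw [if_neg hk, PySem.Dict.get?_insert]
      by_cases hke : k = ep.1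
      · simp [hke]
      · simp [hke, hk]

-- ===== VERDICT (by name: the statement is the Claim_ definition above) =====
theorem group_elements_dsu_spec : Claim_equal_group_elements_dsu := by
  unfold Claim_equal_group_elements_dsu
  intro elements _
  unfold Spec_group_elements_dsu group_elements_dsu group_elements_dsu_alt
  have hget0 : ∀ k, (elements.foldl (fun d ep => d.insert ep.1 ep.1) PySem.Dict.empty).get? k
      = if k ∈ elements.map (·.1) then some k else none := by
    intro k
    rw [root0_get?]
    by_cases hk : k ∈ elements.map (·.1)
    · simp [hk]
    · simp [hk]
  set root0 := elements.foldl (fun d ep => d.insert ep.1 ep.1) PySem.Dict.empty with hroot0def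
  have hmemkeys : ∀ k, k ∈ elements.map (·.1) → k ∈ root0.keys := by
    intro k hk
    by_contra hm
    have h := (PySem.Dict.get?_eq_none_iff_not_mem_keys root0 k).mpr hm
    rw [hget0 k, if_pos hk] at h
    cases h
  have hgd0 : ∀ z, root0.getD z z = z := by
    intro z
    cases h : root0.get? z with
    | none => exact PySem.Dict.getD_of_get?_eq_none _ _ h
    | some v =>
      have hv := hget0 z
      rw [h] at hv
      by_cases hk : z ∈ elements.map (·.1)
      · rw [if_pos hk] at hv
        obtain rfl := Option.some_inj.mp hv
        exact PySem.Dict.getD_of_get?_eq_some _ _ h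
      · rw [if_neg hk] at hv; cases hv
  have hF0 : FlatD root0 := by
    intro k v h
    have hk := hget0 k
    rw [h] at hk
    by_cases hkk : k ∈ elements.map (·.1)
    · rw [if_pos hkk] at hk
      obtain rfl := Option.some_inj.mp hk
      rw [hget0, if_pos hkk]
    · rw [if_neg hkk] at hk; cases hk
  have hG0 : Good PySem.Dict.empty root0 := by
    refine ⟨?_, by simp [PySem.Dict.keys, PySem.Dict.empty]⟩
    intro z
    refine ⟨1, ?_, by omega⟩
    rw [hgd0 z]
    exact rootN_base (by simp) 0
  obtain ⟨hd2, hGood, hFl, hKeys, _⟩ :=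
    loop1_sim elements PySem.Dict.empty root0 PySem.Dict.empty hG0 hF0
      (fun ep hep => hmemkeys ep.1 (List.mem_map.mpr ⟨ep, hep, rfl⟩))
      (by intro v hv; simp [PySem.Dict.values, PySem.Dict.empty] at hv)
  have hK2 : ∀ ep ∈ elements, ep.1 ∈ (elements.foldl stepB (root0, PySem.Dict.empty)).1.keys := by
    intro ep hep
    rw [hKeys]
    exact hmemkeys ep.1 (List.mem_map.mpr ⟨ep, hep, rfl⟩)
  have h2 := loop2_sim elements (elements.foldl stepA (PySem.Dict.empty, PySem.Dict.empty)).1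
      (elements.foldl stepB (root0, PySem.Dict.empty)).1 PySem.Dict.empty hGood hK2
  exact congrArg PySem.Dict.values h2
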